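-- pv_equiv track=rewrite | github.com/mako10k/mcp-assoc-memory | src/mcp_assoc_memory/server.py | validate_scope_path
-- ===== SOURCE A (Python) =====
-- def validate_scope_path(scope: str) -> bool:
--     """Validate scope path format and constraints"""
--     if not scope or len(scope) > 255:
--         return False
--
--     # Check for reserved patterns
--     if scope.startswith('.') or '..' in scope:
--         return False
--
--     # Split and validate each segment
--     segments = scope.split('/')
--     if len(segments) > 10:  # Max depth limit
--         return False
--
--     for segment in segments:
--         if not segment or len(segment) > 50:
--             return False
--         # Allow Unicode characters, alphanumeric, underscore, hyphen
--         if not all(c.isalnum() or c in '_-' or ord(c) > 127 for c in segment):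
--             return False
--
--     return True
-- ===== SOURCE B (Python) =====
-- def validate_scope_path(scope: str) -> bool:
--     # Single left-to-right pass with two counters instead of split()+per-segment scans;
--     # the '.'-guards of the original are subsumed: '.' is never an allowed character.
--     if not scope or len(scope) > 255:
--         return False
--     seg_len = 0
--     seg_count = 1
--     for c in scope:
--         if c == '/':
--             if seg_len == 0:
--                 return False
--             seg_count += 1
--             if seg_count > 10:
--                 return False
--             seg_len = 0
--         else:
--             if not (c.isalnum() or c in '_-' or ord(c) > 127):
--                 return False
--             seg_len += 1
--             if seg_len > 50:
--                 return False
--     return seg_len > 0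
-- ===== Notes on version B (the rewrite author's own statement) =====
-- stated objective: alternative
-- what changed: Replaces the split-into-segments pass plus per-segment scans (and the redundant dot guards, since a dot is never an allowed character) with one left-to-right pass over the string maintaining a current-segment-length counter and a segment counter.
import Mathlib
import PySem

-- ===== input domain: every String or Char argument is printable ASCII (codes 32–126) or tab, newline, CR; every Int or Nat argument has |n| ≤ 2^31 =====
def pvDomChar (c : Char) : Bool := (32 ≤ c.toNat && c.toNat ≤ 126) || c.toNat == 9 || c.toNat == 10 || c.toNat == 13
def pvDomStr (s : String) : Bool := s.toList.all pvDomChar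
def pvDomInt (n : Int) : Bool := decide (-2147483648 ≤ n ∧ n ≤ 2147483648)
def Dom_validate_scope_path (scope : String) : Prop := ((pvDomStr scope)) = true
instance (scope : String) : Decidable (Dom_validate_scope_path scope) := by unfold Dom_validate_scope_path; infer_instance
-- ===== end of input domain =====

-- B replaces split()+per-segment scans (and the redundant '.'-guards) by one
-- left-to-right pass with a segment-length and a segment-count counter (objective: alternative).

-- shared character test: Python's `c.isalnum() or c in '_-' or ord(c) > 127`
def pvValidChar (c : Char) : Bool :=
  PySem.Chars.isalnum c || c == '_' || c == '-' || decide (127 < c.toNat)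

-- ===== PORT A =====
def validate_scope_path (scope : String) : Bool :=
  let s := scope.toList
  if s.length == 0 || decide (255 < s.length) then false
  else if PySem.Chars.startswith s ['.'] || PySem.Chars.isIn ['.', '.'] s then false
  else
    let segments := PySem.Chars.splitOn s ['/']
    if decide (10 < segments.length) then false
    else segments.all (fun seg =>
      if seg.length == 0 || decide (50 < seg.length) then false
      else seg.all pvValidChar)

-- ===== PORT B =====
-- the single-pass loop of Source B: state = (current segment length, number of segments started)
def pvAltLoop : List Char → Nat → Nat → Bool
  | [], segLen, _ => decide (0 < segLen)
  | c :: rest, segLen, segCount =>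
    if c = '/' then
      if segLen = 0 then false
      else if 10 < segCount + 1 then false
      else pvAltLoop rest 0 (segCount + 1)
    else if !pvValidChar c then false
    else if 50 < segLen + 1 then false
    else pvAltLoop rest (segLen + 1) segCount

def validate_scope_path_alt (scope : String) : Bool :=
  let s := scope.toList
  if s.length == 0 || decide (255 < s.length) then false
  else pvAltLoop s 0 1

-- ===== PRECONDITION & SPEC =====
def Spec_validate_scope_path (scope : String) (out : Bool) : Prop := out = validate_scope_path_alt scope
instance (scope : String) (out : Bool) : Decidable (Spec_validate_scope_path scope out) := by unfold Spec_validate_scope_path; infer_instance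

-- ===== CLAIM (what is proved, stated in full; the proofs are below) =====
def Claim_equal_validate_scope_path : Prop := ∀ (scope : String), Dom_validate_scope_path scope → Spec_validate_scope_path scope (validate_scope_path scope)

-- ===== LEMMAS AND PROOFS =====

-- reference form of split on the single character '/', accumulator style
def mySplit : List Char → List Char → List (List Char)
  | [], cur => [cur.reverse]
  | c :: rest, cur => if c = '/' then cur.reverse :: mySplit rest [] else mySplit rest (c :: cur)

theorem go_eq (fuel : Nat) (l cur : List Char) (acc : List (List Char)) (h : l.length ≤ fuel) :
    PySem.Chars.splitOn.go ['/'] fuel l cur acc = acc.reverse ++ mySplit l cur := by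
  induction fuel generalizing l cur acc with
  | zero =>
    have : l = [] := by cases l <;> simp_all
    subst this
    simp [PySem.Chars.splitOn.go, mySplit]
  | succ n ih =>
    cases l with
    | nil => simp [PySem.Chars.splitOn.go, mySplit]
    | cons c rest =>
      simp only [PySem.Chars.splitOn.go]
      by_cases hc : c = '/'
      · subst hc
        simp [List.isPrefixOf, ih rest [] _ (by simpa using h), mySplit]
      · simp [List.isPrefixOf, Ne.symm hc, hc, ih rest (c :: cur) acc (by simpa using h), mySplit]

theorem splitOn_eq (s : List Char) : PySem.Chars.splitOn s ['/'] = mySplit s [] := by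
  have := go_eq (s.length + 1) s [] [] (by omega)
  simpa [PySem.Chars.splitOn] using this

theorem mySplit_ne_nil (l cur : List Char) : mySplit l cur ≠ [] := by
  induction l generalizing cur with
  | nil => simp [mySplit]
  | cons c rest ih => by_cases hc : c = '/' <;> simp [mySplit, hc, ih]

theorem mySplit_modifyHead (l cur : List Char) :
    mySplit l cur = (cur.reverse ++ (mySplit l []).headI) :: (mySplit l []).tail := by
  induction l generalizing cur with
  | nil => simp [mySplit]
  | cons c rest ih =>
    by_cases hc : c = '/'
    · simp [mySplit, hc]
    · simp only [mySplit, if_neg hc]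
      rw [ih (c :: cur), ih [c]]
      simp

-- A's per-segment check
def segOK (seg : List Char) : Bool :=
  if seg.length == 0 || decide (50 < seg.length) then false else seg.all pvValidChar

theorem segOK_false_of_mem {c : Char} {seg : List Char} (hmem : c ∈ seg)
    (hval : pvValidChar c = false) : segOK seg = false := by
  unfold segOK
  split_ifs with h
  · rfl
  · exact List.all_eq_false.mpr ⟨c, hmem, by simp [hval]⟩

theorem segOK_false_of_long {seg : List Char} (h : 50 < seg.length) : segOK seg = false := by
  unfold segOK
  split_ifs with h' <;> simp_all


theorem segOK_reverse_true {cur : List Char} (hpos : cur ≠ [])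
    (hlen : cur.length ≤ 50) (hval : ∀ c ∈ cur, pvValidChar c = true) :
    segOK cur.reverse = true := by
  have h0 : 0 < cur.length := List.length_pos_iff.mpr hpos
  unfold segOK
  rw [if_neg]
  · simp only [List.all_eq_true, List.mem_reverse]; exact hval
  · simp only [List.length_reverse, Bool.or_eq_true, beq_iff_eq, decide_eq_true_eq, not_or]
    omega

theorem altLoop_eq (cs : List Char) (cur : List Char) (k : Nat)
    (hk1 : 1 ≤ k) (hk2 : k ≤ 10) (hlen : cur.length ≤ 50)
    (hval : ∀ c ∈ cur, pvValidChar c = true) :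
    pvAltLoop cs cur.length k =
      (decide ((k - 1) + (mySplit cs cur).length ≤ 10) && (mySplit cs cur).all segOK) := by
  induction cs generalizing cur k with
  | nil =>
    by_cases hcur : cur = []
    · subst hcur; simp [pvAltLoop, mySplit, segOK]
    · have hOK := segOK_reverse_true hcur hlen hval
      have h0 : 0 < cur.length := List.length_pos_iff.mpr hcur
      have h10 : k - 1 + 1 ≤ 10 := by omega
      simp [pvAltLoop, mySplit, hOK, h0, h10]
  | cons c rest ih =>
    by_cases hc : c = '/'
    · subst hc
      simp only [pvAltLoop, mySplit]
      by_cases hcur : cur.length = 0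
      · have : cur = [] := List.length_eq_zero_iff.mp hcur
        subst this
        simp [segOK]
      · rw [if_neg hcur]
        have hcne : cur ≠ [] := by
          intro h; subst h; simp at hcur
        have hOK := segOK_reverse_true hcne hlen hval
        have hge : 1 ≤ (mySplit rest []).length :=
          List.length_pos_iff.mpr (mySplit_ne_nil rest [])
        by_cases hk10 : 10 < k + 1
        · rw [if_pos hk10]
          have hno : ¬ (k - 1 + ((mySplit rest []).length + 1) ≤ 10) := by omega
          simp [hno]
        · rw [if_neg hk10]
          have hrec := ih [] (k + 1) (by omega) (by omega) (by simp) (by simp)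
          simp only [List.length_nil] at hrec
          rw [hrec]
          have harith : (k + (mySplit rest []).length ≤ 10) =
              ((k - 1) + ((mySplit rest []).length + 1) ≤ 10) := by
            simp only [eq_iff_iff]; omega
          simp [hOK, harith]
    · simp only [pvAltLoop, mySplit, if_neg hc]
      have hhead : mySplit rest (c :: cur) =
          ((c :: cur).reverse ++ (mySplit rest []).headI) :: (mySplit rest []).tail :=
        mySplit_modifyHead rest (c :: cur)
      by_cases hv : pvValidChar c = true
      · simp only [hv, Bool.not_true, Bool.false_eq_true, if_false]
        by_cases h50 : 50 < cur.length + 1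
        · rw [if_pos h50]
          have hbad : segOK (((c :: cur).reverse ++ (mySplit rest []).headI)) = false := by
            apply segOK_false_of_long
            simp only [List.length_append, List.length_reverse, List.length_cons]
            omega
          rw [hhead]
          simp only [List.all_cons, hbad, Bool.false_and, Bool.and_false]
        · rw [if_neg h50]
          have hrec := ih (c :: cur) k hk1 hk2
            (by simp only [List.length_cons]; omega)
            (by intro x hx
                rcases List.mem_cons.mp hx with h | h
                · subst h; exact hv
                · exact hval x h)
          exact hrec
      · have hv' : pvValidChar c = false := by simpa using hv
        simp only [hv', Bool.not_false, if_true]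
        have hmem : c ∈ (c :: cur).reverse ++ (mySplit rest []).headI := by simp
        have hbad : segOK ((c :: cur).reverse ++ (mySplit rest []).headI) = false :=
          segOK_false_of_mem hmem hv'
        rw [hhead]
        simp only [List.all_cons, hbad, Bool.false_and, Bool.and_false]

theorem altLoop_false_of_dot (cs : List Char) (hmem : '.' ∈ cs) (segLen segCount : Nat) :
    pvAltLoop cs segLen segCount = false := by
  induction cs generalizing segLen segCount with
  | nil => simp at hmem
  | cons c rest ih =>
    simp only [pvAltLoop]
    rcases List.mem_cons.mp hmem with h | h
    · subst h
      have hns : ('.' : Char) ≠ '/' := by decide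
      have hnv : pvValidChar '.' = false := by decide
      simp [hns, hnv]
    · split_ifs <;> first | rfl | exact ih h _ _

-- ===== VERDICT (by name: the statement is the Claim_ definition above) =====
theorem validate_scope_path_spec : Claim_equal_validate_scope_path := by
  intro scope _
  unfold Spec_validate_scope_path validate_scope_path validate_scope_path_alt
  set s := scope.toList with hs
  by_cases hg : (s.length == 0 || decide (255 < s.length)) = true
  · simp [hg]
  · simp only [hg, Bool.false_eq_true, if_false]
    by_cases hdot : (PySem.Chars.startswith s ['.'] || PySem.Chars.isIn ['.', '.'] s) = true
    · rw [if_pos hdot]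
      have hmem : '.' ∈ s := by
        rcases Bool.or_eq_true_iff.mp hdot with h | h
        · have := (PySem.Chars.startswith_iff s ['.']).mp h
          rcases this with ⟨t, ht⟩
          rw [← ht]; simp
        · have := (PySem.Chars.isIn_iff_infix ['.', '.'] s).mp h
          rcases this with ⟨p, q, hpq⟩
          rw [← hpq]; simp
      exact (altLoop_false_of_dot s hmem 0 1).symm
    · rw [if_neg hdot]
      rw [splitOn_eq]
      have hkey := altLoop_eq s [] 1 (by omega) (by omega) (by simp) (by simp)
      simp only [List.length_nil] at hkey
      rw [hkey]
      show (if decide (10 < (mySplit s []).length) then false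
            else (mySplit s []).all segOK) =
        (decide (1 - 1 + (mySplit s []).length ≤ 10) && (mySplit s []).all segOK)
      by_cases h10 : 10 < (mySplit s []).length
      · have hd : decide (10 < (mySplit s []).length) = true := by simpa using h10
        have hd2 : decide (1 - 1 + (mySplit s []).length ≤ 10) = false := by
          simp only [decide_eq_false_iff_not]; omega
        rw [hd, hd2]
        simp
      · have hd : decide (10 < (mySplit s []).length) = false := by simpa using h10
        have hd2 : decide (1 - 1 + (mySplit s []).length ≤ 10) = true := by
          simp only [decide_eq_true_eq]; omega
        rw [hd, hd2]
        simp
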